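-- pv_equiv track=rewrite | github.com/ianlintner/caretaker | src/caretaker/foundry/dispatcher.py | routing_override
-- ===== SOURCE A (Python) =====
-- LABEL_AGENT_CUSTOM = "agent:custom"
--
-- LABEL_AGENT_COPILOT = "agent:copilot"
--
-- LABEL_AGENT_QUARANTINE = "agent:quarantine"
--
-- LABEL_AGENT_PREFIX = "agent:"
--
-- _RESERVED_AGENT_SUFFIXES = frozenset({"custom", "copilot", "quarantine"})
--
-- def _label_names(labels: object) -> set[str]:
--     """Best-effort label extraction. Accepts list[str] | list[dict] | list[Label]."""
--     if not labels:
--         return set()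
--     names: set[str] = set()
--     try:
--         iterator = iter(labels)  # type: ignore[call-overload]
--     except TypeError:
--         return names
--     for label in iterator:
--         if isinstance(label, str):
--             names.add(label)
--         else:
--             name = getattr(label, "name", None)
--             if isinstance(name, str):
--                 names.add(name)
--                 continue
--             if isinstance(label, dict):
--                 val = label.get("name")
--                 if isinstance(val, str):
--                     names.add(val)
--     return names
--
-- def routing_override(labels: object) -> str | None:
--     """Return the routing override dictated by labels, or ``None``.
--
--     Precedence is: quarantine > copilot > specific agent (``agent:<name>``)
--     > legacy ``custom`` alias. Caller decides how to act on each value;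
--     see :class:`ExecutorDispatcher.route`.
--
--     Returns either one of the legacy constants
--     (:data:`LABEL_AGENT_QUARANTINE` / :data:`LABEL_AGENT_COPILOT` /
--     :data:`LABEL_AGENT_CUSTOM`) or a bare ``agent:<name>`` string for the
--     caller to resolve against the registry.
--     """
--     names = _label_names(labels)
--     if LABEL_AGENT_QUARANTINE in names:
--         return LABEL_AGENT_QUARANTINE
--     # Specific ``agent:<name>`` labels (other than reserved suffixes) win
--     # over the legacy ``agent:custom`` alias so operators can target a
--     # particular registered agent on a per-PR basis. Sorted for
--     # determinism when an operator stacks multiple ``agent:<name>``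
--     # labels (rare; surfaced as a config smell elsewhere).
--     for label in sorted(names):
--         if not label.startswith(LABEL_AGENT_PREFIX):
--             continue
--         suffix = label[len(LABEL_AGENT_PREFIX) :]
--         if suffix and suffix not in _RESERVED_AGENT_SUFFIXES:
--             return label
--     if LABEL_AGENT_CUSTOM in names:
--         return LABEL_AGENT_CUSTOM
--     if LABEL_AGENT_COPILOT in names:
--         return LABEL_AGENT_COPILOT
--     return None
-- ===== SOURCE B (Python) =====
-- _PRIORITY_RESERVED = {"agent:custom", "agent:copilot", "agent:quarantine"}
--
-- def routing_override(labels):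
--     """Single pass: classify each label into a (priority, name) key and keep the minimum."""
--     best = None
--     for label in labels or ():
--         if label == "agent:quarantine":
--             key = (0, "")
--         elif label.startswith("agent:") and len(label) > 6 and label not in _PRIORITY_RESERVED:
--             key = (1, label)
--         elif label == "agent:custom":
--             key = (2, "")
--         elif label == "agent:copilot":
--             key = (3, "")
--         else:
--             continue
--         if best is None or key < best:
--             best = key
--     if best is None:
--         return None
--     p, name = best
--     return {0: "agent:quarantine", 2: "agent:custom", 3: "agent:copilot"}.get(p, name)
-- ===== Notes on version B (the rewrite author's own statement) =====
-- stated objective: alternative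
-- what changed: replaced A's dedup-into-a-set, sort, then first-match scan plus three membership checks by a single pass over the raw labels that classifies each label into a (priority, name) key and keeps the lexicographic minimum, mapping the winning priority back to the result
import Mathlib
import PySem

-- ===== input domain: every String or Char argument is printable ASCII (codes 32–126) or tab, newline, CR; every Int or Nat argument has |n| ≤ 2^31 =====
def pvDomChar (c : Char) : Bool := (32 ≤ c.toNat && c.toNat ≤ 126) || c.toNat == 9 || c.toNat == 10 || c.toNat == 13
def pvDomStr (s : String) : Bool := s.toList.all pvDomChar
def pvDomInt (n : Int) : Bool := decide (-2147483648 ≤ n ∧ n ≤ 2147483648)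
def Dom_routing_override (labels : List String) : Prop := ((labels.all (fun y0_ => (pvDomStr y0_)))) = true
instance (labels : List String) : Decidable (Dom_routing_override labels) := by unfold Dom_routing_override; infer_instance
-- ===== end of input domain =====

-- B replaces A's set-build + sort + first-match scan by a single pass keeping the minimum (priority, name) key; equal return value proved.

-- ===== PORT A =====
-- _label_names: for a list of strings this is the 'not labels' guard then adding each string to a set
def rOLabelNames (labels : List String) : PySem.Set String :=
  if labels.isEmpty then PySem.Set.empty
  else labels.foldl (fun names label => PySem.Set.add names label) PySem.Set.empty

-- the 'for label in sorted(names)' loop of A (return = some, falling off the end = none)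
def rOFindAgent : List String → Option String
  | [] => none
  | label :: rest =>
    if ¬ (PySem.Str.startswith label "agent:" = true) then rOFindAgent rest
    else
      let suffix := PySem.Str.slice label (some 6) none
      if suffix ≠ "" ∧ suffix ∉ ["custom", "copilot", "quarantine"] then some label
      else rOFindAgent rest

def routing_override (labels : List String) : Option String :=
  let names := rOLabelNames labels
  if PySem.Set.contains names "agent:quarantine" then some "agent:quarantine"
  else
    match rOFindAgent (PySem.List.sorted names (fun x => x) false) with
    | some label => some label
    | none =>
      if PySem.Set.contains names "agent:custom" then some "agent:custom"
      else if PySem.Set.contains names "agent:copilot" then some "agent:copilot"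
      else none

-- ===== PORT B =====
def rOClassify (label : String) : Option (Nat × String) :=
  if label = "agent:quarantine" then some (0, "")
  else if PySem.Str.startswith label "agent:" = true ∧ (6 : Int) < PySem.Str.len label ∧
          label ∉ ["agent:custom", "agent:copilot", "agent:quarantine"] then some (1, label)
  else if label = "agent:custom" then some (2, "")
  else if label = "agent:copilot" then some (3, "")
  else none

-- Python tuple comparison key < best (lexicographic)
def rOKeyLt (a b : Nat × String) : Bool := decide (a.1 < b.1) || (a.1 == b.1 && decide (a.2 < b.2))

-- the loop body of B
def rOStep (best : Option (Nat × String)) (label : String) : Option (Nat × String) :=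
  match rOClassify label with
  | none => best
  | some k =>
    match best with
    | none => some k
    | some b => if rOKeyLt k b then some k else some b

def rOBest (labels : List String) : Option (Nat × String) :=
  labels.foldl rOStep none

def routing_override_alt (labels : List String) : Option String :=
  match rOBest labels with
  | none => none
  | some (p, name) =>
    some (if p = 0 then "agent:quarantine"
          else if p = 2 then "agent:custom"
          else if p = 3 then "agent:copilot"
          else name)

-- ===== PRECONDITION & SPEC =====
def Spec_routing_override (labels : List String) (out : Option String) : Prop := out = routing_override_alt labels
instance (labels : List String) (out : Option String) : Decidable (Spec_routing_override labels out) := by unfold Spec_routing_override; infer_instance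

-- ===== CLAIM (what is proved, stated in full; the proofs are below) =====
def Claim_equal_routing_override : Prop := ∀ (labels : List String), Dom_routing_override labels → Spec_routing_override labels (routing_override labels)

-- ===== LEMMAS AND PROOFS =====

-- B's qualifying condition for a specific agent:<name> label, as a Prop
abbrev rOQual (l : String) : Prop :=
  PySem.Str.startswith l "agent:" = true ∧ (6 : Int) < PySem.Str.len l ∧
  l ∉ (["agent:custom", "agent:copilot", "agent:quarantine"] : List String)


-- A's suffix-based qualifying condition equals B's full-name based one
lemma rOQualA_iff (l : String) :
    (PySem.Str.startswith l "agent:" = true ∧ PySem.Str.slice l (some 6) none ≠ "" ∧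
     PySem.Str.slice l (some 6) none ∉ (["custom", "copilot", "quarantine"] : List String)) ↔ rOQual l := by
  unfold rOQual
  by_cases hs : PySem.Str.startswith l "agent:" = true
  · have hpre : "agent:".toList <+: l.toList := by
      rw [PySem.Str.startswith_eq] at hs
      exact (PySem.Chars.startswith_iff _ _).mp hs
    obtain ⟨t, ht⟩ := hpre
    have hslice : (PySem.Str.slice l (some 6) none).toList = t := by
      have h1 : (PySem.Str.slice l (some 6) none).toList = l.toList.drop 6 := by
        simp [pysem]
      rw [h1, ← ht]
      rfl
    have hlen : PySem.Str.len l = (6 : Int) + t.length := by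
      have h2 : PySem.Str.len l = (l.toList.length : Int) := by simp [pysem]
      rw [h2, ← ht, List.length_append]
      push_cast
      ring_nf
      rfl
    have key : ∀ (s full : String), full.toList = "agent:".toList ++ s.toList →
        (PySem.Str.slice l (some 6) none = s ↔ l = full) := by
      intro s full hf
      rw [← String.toList_inj, hslice, ← String.toList_inj (s₁ := l), ← ht, hf]
      constructor
      · intro h; rw [h]
      · intro h; exact List.append_cancel_left h
    have hne : PySem.Str.slice l (some 6) none ≠ "" ↔ (6 : Int) < PySem.Str.len l := by
      rw [hlen]
      constructor
      · intro h
        have ht' : t ≠ [] := by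
          intro h0
          exact h (String.toList_inj.mp (by rw [hslice, h0]; rfl))
        have hp : 0 < t.length := List.length_pos_iff.mpr ht'
        omega
      · intro h hsz
        rw [← String.toList_inj, hslice] at hsz
        have : t = [] := by simpa using hsz
        rw [this] at h
        simp at h
    have k1 := key "custom" "agent:custom" (by decide)
    have k2 := key "copilot" "agent:copilot" (by decide)
    have k3 := key "quarantine" "agent:quarantine" (by decide)
    simp only [hs, true_and, List.mem_cons, List.not_mem_nil, or_false, not_or]
    rw [hne, k1, k2, k3]
  · constructor
    · rintro ⟨h, -, -⟩; exact absurd h hs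
    · rintro ⟨h, -, -⟩; exact absurd h hs

lemma rOLabelNames_eq (labels : List String) : rOLabelNames labels = PySem.Set.ofList labels := by
  unfold rOLabelNames
  split
  · next h =>
    rw [List.isEmpty_iff] at h
    subst h
    rfl
  · exact (PySem.Set.ofList_eq_foldl labels).symm

lemma rOClassify_of_qual (l : String) (h : rOQual l) : rOClassify l = some (1, l) := by
  have hne : l ≠ "agent:quarantine" := fun e => h.2.2 (by rw [e]; simp)
  unfold rOClassify
  rw [if_neg hne, if_pos h]

lemma rOClassify_eq_none (l : String) (hq : l ≠ "agent:quarantine") (hc : l ≠ "agent:custom")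
    (hp : l ≠ "agent:copilot") (hqual : ¬ rOQual l) : rOClassify l = none := by
  unfold rOClassify
  rw [if_neg hq, if_neg hqual, if_neg hc, if_neg hp]

lemma rOClassify_inv (l : String) (k : Nat × String) (h : rOClassify l = some k) :
    (k = (0, "") ∧ l = "agent:quarantine") ∨ (k = (1, l) ∧ rOQual l) ∨
    (k = (2, "") ∧ l = "agent:custom") ∨ (k = (3, "") ∧ l = "agent:copilot") := by
  unfold rOClassify at h
  split_ifs at h with g1 g2 g3 g4
  · exact Or.inl ⟨(Option.some.inj h).symm, g1⟩
  · exact Or.inr (Or.inl ⟨(Option.some.inj h).symm, g2⟩)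
  · exact Or.inr (Or.inr (Or.inl ⟨(Option.some.inj h).symm, g3⟩))
  · exact Or.inr (Or.inr (Or.inr ⟨(Option.some.inj h).symm, g4⟩))

lemma rOKeyLt_iff (a b : Nat × String) : rOKeyLt a b = true ↔ a.1 < b.1 ∨ (a.1 = b.1 ∧ a.2 < b.2) := by
  simp [rOKeyLt]

-- keyLE b a means b = a ∨ rOKeyLt b a = true; transitivity
lemma rOKeyLE_trans {a b c : Nat × String} (h1 : a = b ∨ rOKeyLt a b = true)
    (h2 : b = c ∨ rOKeyLt b c = true) : a = c ∨ rOKeyLt a c = true := by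
  rcases h1 with rfl | h1
  · exact h2
  rcases h2 with rfl | h2
  · exact Or.inr h1
  rw [rOKeyLt_iff] at h1 h2 ⊢
  right
  rcases h1 with h1 | ⟨e1, h1⟩ <;> rcases h2 with h2 | ⟨e2, h2⟩
  · left; omega
  · left; omega
  · left; omega
  · exact Or.inr ⟨e1.trans e2, h1.trans h2⟩

lemma rOKeyLE_of_not_lt {a b : Nat × String} (h : rOKeyLt a b = false) :
    b = a ∨ rOKeyLt b a = true := by
  by_cases he : b = a
  · exact Or.inl he
  right
  rw [rOKeyLt_iff]
  have h' : ¬ (a.1 < b.1 ∨ (a.1 = b.1 ∧ a.2 < b.2)) := by rw [← rOKeyLt_iff]; simp [h]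
  rcases Nat.lt_trichotomy b.1 a.1 with hlt | heq | hgt
  · exact Or.inl hlt
  · right
    refine ⟨heq, ?_⟩
    rcases lt_trichotomy b.2 a.2 with hs | hs | hs
    · exact hs
    · exact absurd (Prod.ext heq hs) he
    · exact absurd (Or.inr ⟨heq.symm, hs⟩) h'
  · exact absurd (Or.inl hgt) h'

lemma rOStep_none_classify {x : String} (acc : Option (Nat × String)) (h : rOClassify x = none) :
    rOStep acc x = acc := by
  unfold rOStep; rw [h]

lemma rOStep_some_none {x : String} {k : Nat × String} (h : rOClassify x = some k) :
    rOStep none x = some k := by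
  unfold rOStep; rw [h]

lemma rOStep_some_some {x : String} {k : Nat × String} (a : Nat × String) (h : rOClassify x = some k) :
    rOStep (some a) x = if rOKeyLt k a then some k else some a := by
  unfold rOStep; rw [h]

lemma rOStep_eq_none (acc : Option (Nat × String)) (x : String) :
    rOStep acc x = none ↔ acc = none ∧ rOClassify x = none := by
  rcases hc : rOClassify x with _ | k
  · rw [rOStep_none_classify acc hc]
    simp
  · rcases acc with _ | a
    · rw [rOStep_some_none hc]
      simp
    · rw [rOStep_some_some a hc]
      constructor
      · intro h
        split_ifs at h
      · intro hcon
        cases hcon.1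

-- full characterization of B's fold
lemma rOBest_fold (labels : List String) : ∀ (acc : Option (Nat × String)),
    (labels.foldl rOStep acc = none ↔ acc = none ∧ ∀ l ∈ labels, rOClassify l = none) ∧
    (∀ b, labels.foldl rOStep acc = some b →
      (acc = some b ∨ ∃ l ∈ labels, rOClassify l = some b) ∧
      (∀ a, acc = some a → b = a ∨ rOKeyLt b a = true) ∧
      (∀ l ∈ labels, ∀ k, rOClassify l = some k → b = k ∨ rOKeyLt b k = true)) := by
  induction labels with
  | nil =>
    intro acc
    refine ⟨by simp, ?_⟩
    intro b h
    simp only [List.foldl_nil] at h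
    exact ⟨Or.inl h, fun a ha => by rw [h] at ha; exact Or.inl (Option.some.inj ha), by simp⟩
  | cons x rest ih =>
    intro acc
    simp only [List.foldl_cons]
    obtain ⟨ihn, ihs⟩ := ih (rOStep acc x)
    constructor
    · rw [ihn, rOStep_eq_none]
      simp only [List.mem_cons]
      constructor
      · rintro ⟨⟨h1, h2⟩, h3⟩
        exact ⟨h1, fun l hl => hl.elim (fun e => e ▸ h2) (h3 l)⟩
      · rintro ⟨h1, h2⟩
        exact ⟨⟨h1, h2 x (Or.inl rfl)⟩, fun l hl => h2 l (Or.inr hl)⟩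
    · intro b h
      obtain ⟨c1, c2, c3⟩ := ihs b h
      refine ⟨?_, ?_, ?_⟩
      · -- origin of b
        rcases c1 with hc1 | ⟨l, hl, hcl⟩
        · rcases hcx : rOClassify x with _ | k
          · rw [rOStep_none_classify acc hcx] at hc1
            exact Or.inl hc1
          · rcases acc with _ | a
            · rw [rOStep_some_none hcx] at hc1
              exact Or.inr ⟨x, List.mem_cons_self, by rw [hcx, Option.some.inj hc1]⟩
            · rw [rOStep_some_some a hcx] at hc1
              split_ifs at hc1
              · exact Or.inr ⟨x, List.mem_cons_self, by rw [hcx, Option.some.inj hc1]⟩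
              · exact Or.inl (by rw [Option.some.inj hc1])
        · exact Or.inr ⟨l, List.mem_cons_of_mem x hl, hcl⟩
      · -- relation to the initial accumulator
        intro a ha
        subst ha
        rcases hcx : rOClassify x with _ | k
        · exact c2 a (rOStep_none_classify _ hcx)
        · by_cases hlt : rOKeyLt k a = true
          · exact rOKeyLE_trans (c2 k (by rw [rOStep_some_some a hcx, if_pos hlt])) (Or.inr hlt)
          · exact c2 a (by rw [rOStep_some_some a hcx, if_neg hlt])
      · -- minimality over all labels
        intro l hl k hk
        rcases List.mem_cons.mp hl with rfl | hl'
        · rcases acc with _ | a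
          · exact c2 k (rOStep_some_none hk)
          · by_cases hlt : rOKeyLt k a = true
            · exact c2 k (by rw [rOStep_some_some a hk, if_pos hlt])
            · exact rOKeyLE_trans (c2 a (by rw [rOStep_some_some a hk, if_neg hlt]))
                (rOKeyLE_of_not_lt (Bool.eq_false_iff.mpr hlt))
        · exact c3 l hl' k hk

lemma rOBest_spec (labels : List String) :
    (rOBest labels = none ↔ ∀ l ∈ labels, rOClassify l = none) ∧
    (∀ b, rOBest labels = some b →
      (∃ l ∈ labels, rOClassify l = some b) ∧
      (∀ l ∈ labels, ∀ k, rOClassify l = some k → b = k ∨ rOKeyLt b k = true)) := by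
  obtain ⟨h1, h2⟩ := rOBest_fold labels none
  refine ⟨by simpa [rOBest] using h1, ?_⟩
  intro b hb
  obtain ⟨c1, -, c3⟩ := h2 b hb
  rcases c1 with hc | hc
  · exact absurd hc (by simp)
  · exact ⟨hc, c3⟩

lemma rOFindAgent_cons (x : String) (rest : List String) :
    rOFindAgent (x :: rest) = if rOQual x then some x else rOFindAgent rest := by
  by_cases hs : PySem.Str.startswith x "agent:" = true
  · simp only [rOFindAgent]
    rw [if_neg (fun h => h hs)]
    show (if PySem.Str.slice x (some 6) none ≠ "" ∧
        PySem.Str.slice x (some 6) none ∉ (["custom", "copilot", "quarantine"] : List String)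
        then some x else rOFindAgent rest) = _
    by_cases hc : PySem.Str.slice x (some 6) none ≠ "" ∧
        PySem.Str.slice x (some 6) none ∉ (["custom", "copilot", "quarantine"] : List String)
    · rw [if_pos hc, if_pos ((rOQualA_iff x).mp ⟨hs, hc.1, hc.2⟩)]
    · rw [if_neg hc, if_neg (fun hq => hc ⟨(((rOQualA_iff x).mpr hq)).2.1, (((rOQualA_iff x).mpr hq)).2.2⟩)]
  · simp only [rOFindAgent]
    rw [if_pos hs, if_neg (fun hq => hs hq.1)]

lemma rOFindAgent_eq_some (xs : List String) (hsrt : xs.Pairwise (· < ·)) (m : String)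
    (hm : m ∈ xs) (hq : rOQual m) (hmin : ∀ y ∈ xs, rOQual y → m ≤ y) :
    rOFindAgent xs = some m := by
  induction xs with
  | nil => cases hm
  | cons x rest ih =>
    rw [rOFindAgent_cons]
    rcases List.mem_cons.mp hm with rfl | hmt
    · rw [if_pos hq]
    · by_cases hqx : rOQual x
      · have hxm : x < m := ((List.pairwise_cons.mp hsrt).1) m hmt
        have hmx : m ≤ x := hmin x List.mem_cons_self hqx
        exact absurd hxm (not_lt.mpr hmx)
      · rw [if_neg hqx]
        exact ih (List.pairwise_cons.mp hsrt).2 hmt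
          (fun y hy hqy => hmin y (List.mem_cons_of_mem x hy) hqy)

lemma rOFindAgent_eq_none (xs : List String) (h : ∀ y ∈ xs, ¬ rOQual y) :
    rOFindAgent xs = none := by
  induction xs with
  | nil => rfl
  | cons x rest ih =>
    rw [rOFindAgent_cons, if_neg (h x List.mem_cons_self)]
    exact ih (fun y hy => h y (List.mem_cons_of_mem x hy))

-- ===== VERDICT (by name: the statement is the Claim_ definition above) =====
theorem routing_override_spec : Claim_equal_routing_override := by
  unfold Claim_equal_routing_override
  intro labels _
  unfold Spec_routing_override
  obtain ⟨hnone, hsome⟩ := rOBest_spec labels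
  have hcont : ∀ s : String, PySem.Set.contains (rOLabelNames labels) s = true ↔ s ∈ labels := by
    intro s
    rw [rOLabelNames_eq]
    exact (PySem.Set.contains_iff _ _).trans (PySem.Set.mem_ofList _ _)
  simp only [routing_override, routing_override_alt]
  by_cases hq : "agent:quarantine" ∈ labels
  · rw [if_pos ((hcont _).mpr hq)]
    have hclq : rOClassify "agent:quarantine" = some (0, "") := by decide
    rcases hb : rOBest labels with _ | b
    · exact absurd ((hnone.mp hb) _ hq) (by rw [hclq]; simp)
    · obtain ⟨⟨l, hl, hcl⟩, hmin⟩ := hsome b hb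
      have hb0 : b = (0, "") := by
        rcases rOClassify_inv l b hcl with ⟨hbv, -⟩ | ⟨hbv, -⟩ | ⟨hbv, -⟩ | ⟨hbv, -⟩
        · exact hbv
        all_goals
          exfalso
          subst hbv
          rcases hmin _ hq _ hclq with he | hlt
          · simp at he
          · rw [rOKeyLt_iff] at hlt
            simp at hlt
      rw [hb0]
      simp
  · rw [if_neg (fun h => hq ((hcont _).mp h))]
    have hsorted_mem : ∀ y, y ∈ PySem.List.sorted (rOLabelNames labels) (fun x => x) false ↔ y ∈ labels := by
      intro y
      rw [rOLabelNames_eq, PySem.List.mem_sorted, PySem.Set.mem_ofList]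
    by_cases hqa : ∃ m ∈ labels, rOQual m
    · -- a minimal qualifying label exists
      obtain ⟨m0, hm0, hq0⟩ := hqa
      have hne : (labels.filter (fun l => decide (rOQual l))).toFinset.Nonempty := by
        exact ⟨m0, List.mem_toFinset.mpr (List.mem_filter.mpr ⟨hm0, decide_eq_true hq0⟩)⟩
      obtain ⟨m, hmf, hmmin⟩ := Finset.exists_min_image _ id hne
      rw [List.mem_toFinset, List.mem_filter] at hmf
      obtain ⟨hmmem, hmq'⟩ := hmf
      have hmq : rOQual m := of_decide_eq_true hmq'
      have hminall : ∀ y ∈ labels, rOQual y → m ≤ y := by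
        intro y hy hqy
        exact hmmin y (List.mem_toFinset.mpr (List.mem_filter.mpr ⟨hy, decide_eq_true hqy⟩))
      have hfa : rOFindAgent (PySem.List.sorted (rOLabelNames labels) (fun x => x) false) = some m := by
        apply rOFindAgent_eq_some
        · rw [rOLabelNames_eq]
          exact PySem.List.sorted_ofList_pairwise_lt labels
        · exact (hsorted_mem m).mpr hmmem
        · exact hmq
        · intro y hy hqy
          exact hminall y ((hsorted_mem y).mp hy) hqy
      rw [hfa]
      rcases hb : rOBest labels with _ | b
      · exact absurd ((hnone.mp hb) _ hmmem) (by rw [rOClassify_of_qual m hmq]; simp)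
      · obtain ⟨⟨l, hl, hcl⟩, hmin⟩ := hsome b hb
        have hble := hmin _ hmmem _ (rOClassify_of_qual m hmq)
        have hb1 : b = (1, m) := by
          rcases rOClassify_inv l b hcl with ⟨hbv, hlv⟩ | ⟨hbv, hlq⟩ | ⟨hbv, hlv⟩ | ⟨hbv, hlv⟩
          · exact absurd (hlv ▸ hl) hq
          · -- b = (1, l) with l qualifying: l = m by antisymmetry
            subst hbv
            have h1 : m ≤ l := hminall l hl hlq
            have h2 : l ≤ m := by
              rcases hble with he | hlt
              · exact le_of_eq (Prod.mk.injEq .. ▸ he).2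
              · rw [rOKeyLt_iff] at hlt
                rcases hlt with h | ⟨-, h⟩
                · simp at h
                · exact le_of_lt h
            rw [le_antisymm h2 h1]
          all_goals
            exfalso
            subst hbv
            rcases hble with he | hlt
            · simp at he
            · rw [rOKeyLt_iff] at hlt
              simp at hlt
        rw [hb1]
        simp
    · replace hqa : ∀ m ∈ labels, ¬ rOQual m := fun m hm hq' => hqa ⟨m, hm, hq'⟩
      have hfa : rOFindAgent (PySem.List.sorted (rOLabelNames labels) (fun x => x) false) = none := by
        apply rOFindAgent_eq_none
        intro y hy
        exact hqa y ((hsorted_mem y).mp hy)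
      rw [hfa]
      by_cases hcu : "agent:custom" ∈ labels
      · rw [if_pos ((hcont _).mpr hcu)]
        have hclc : rOClassify "agent:custom" = some (2, "") := by decide
        rcases hb : rOBest labels with _ | b
        · exact absurd ((hnone.mp hb) _ hcu) (by rw [hclc]; simp)
        · obtain ⟨⟨l, hl, hcl⟩, hmin⟩ := hsome b hb
          have hble := hmin _ hcu _ hclc
          have hb2 : b = (2, "") := by
            rcases rOClassify_inv l b hcl with ⟨hbv, hlv⟩ | ⟨hbv, hlq⟩ | ⟨hbv, hlv⟩ | ⟨hbv, hlv⟩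
            · exact absurd (hlv ▸ hl) hq
            · exact absurd hlq (hqa l hl)
            · exact hbv
            · exfalso
              subst hbv
              rcases hble with he | hlt
              · simp at he
              · rw [rOKeyLt_iff] at hlt
                simp at hlt
          rw [hb2]
          simp
      · rw [if_neg (fun h => hcu ((hcont _).mp h))]
        by_cases hcp : "agent:copilot" ∈ labels
        · rw [if_pos ((hcont _).mpr hcp)]
          have hclp : rOClassify "agent:copilot" = some (3, "") := by decide
          rcases hb : rOBest labels with _ | b
          · exact absurd ((hnone.mp hb) _ hcp) (by rw [hclp]; simp)
          · obtain ⟨⟨l, hl, hcl⟩, -⟩ := hsome b hb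
            have hb3 : b = (3, "") := by
              rcases rOClassify_inv l b hcl with ⟨hbv, hlv⟩ | ⟨hbv, hlq⟩ | ⟨hbv, hlv⟩ | ⟨hbv, hlv⟩
              · exact absurd (hlv ▸ hl) hq
              · exact absurd hlq (hqa l hl)
              · exact absurd (hlv ▸ hl) hcu
              · exact hbv
            rw [hb3]
            simp
        · rw [if_neg (fun h => hcp ((hcont _).mp h))]
          have hbn : rOBest labels = none := by
            rw [hnone]
            intro l hl
            apply rOClassify_eq_none
            · intro h; exact hq (h ▸ hl)
            · intro h; exact hcu (h ▸ hl)
            · intro h; exact hcp (h ▸ hl)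
            · exact hqa l hl
          rw [hbn]
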